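-- pv_equiv track=rewrite | github.com/friveramariani/Bioinformatics_Specialization | Biology_meets_programming/Skew.py | skew
-- ===== SOURCE A (Python) =====
-- def skew(Genome):
--     Skew = {}
--     Skew[0] = 0                                 # Initialize the list with first value of zero.
--     for i in range(0,len(Genome)):
--         if Genome[i] == 'G':
--             Skew[i+1] = (Skew[(i+1) -1] + 1)
--         elif Genome[i] == 'C':
--             Skew[i+1] = (Skew[(i+1) -1] - 1)
--         else:
--             Skew[i+1] = (Skew[(i+1) -1])
--
--
--     return Skew
-- ===== SOURCE B (Python) =====
-- def skew(Genome):
--     # Divide and conquer: skew values of s are values(left half) followed by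
--     # last(left half) + each value of the right half; recursion bottoms out at one character.
--     def solve(s):
--         n = len(s)
--         if n == 0:
--             return []
--         if n == 1:
--             return [1 if s == 'G' else (-1 if s == 'C' else 0)]
--         mid = n // 2
--         left = solve(s[:mid])
--         right = solve(s[mid:])
--         t = left[-1]
--         return left + [t + x for x in right]
--     return {i: v for i, v in enumerate([0] + solve(Genome))}
-- ===== Notes on version B (the rewrite author's own statement) =====
-- stated objective: alternative
-- what changed: Replaces A's left-to-right pass that threads the running total through reads of the previous dict entry with a divide-and-conquer recursion: solve each half independently, then shift the right half's values by the left half's final total; the dict is built at the end from the assembled value list.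
import Mathlib
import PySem

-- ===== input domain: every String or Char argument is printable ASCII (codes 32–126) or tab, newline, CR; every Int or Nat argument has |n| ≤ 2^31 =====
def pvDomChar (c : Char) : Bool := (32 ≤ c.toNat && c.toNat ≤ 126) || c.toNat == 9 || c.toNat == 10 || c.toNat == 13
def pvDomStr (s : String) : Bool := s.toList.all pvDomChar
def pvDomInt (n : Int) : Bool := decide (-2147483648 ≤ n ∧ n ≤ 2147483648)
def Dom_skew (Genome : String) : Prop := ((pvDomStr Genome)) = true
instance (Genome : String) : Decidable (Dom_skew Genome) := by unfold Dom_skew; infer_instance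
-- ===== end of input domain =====

-- B replaces A's dict-threaded left-to-right pass with a divide-and-conquer recursion (solve halves, shift the right half by the left half's total); alternative decomposition, not claimed faster.


-- ===== PORT A =====
-- A's loop body: Skew[(i+1)-1] is always present, so the getD default 0 is never used.
def skewBody (Genome : String) (S : PySem.Dict Int Int) (i : Int) : PySem.Dict Int Int :=
  if PySem.Str.pyGet? Genome i = some 'G' then S.insert (i + 1) (S.getD ((i + 1) - 1) 0 + 1)
  else if PySem.Str.pyGet? Genome i = some 'C' then S.insert (i + 1) (S.getD ((i + 1) - 1) 0 - 1)
  else S.insert (i + 1) (S.getD ((i + 1) - 1) 0)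

def skew (Genome : String) : List (Int × Int) :=
  let S0 : PySem.Dict Int Int := PySem.Dict.empty.insert 0 0
  ((PySem.List.pyRange 0 (PySem.Str.len Genome) 1).foldl (skewBody Genome) S0).items

-- ===== PORT B =====
-- Source B's single-character base case: 1 if s == 'G' else (-1 if s == 'C' else 0)
def skewDelta (c : Char) : Int := if c = 'G' then 1 else if c = 'C' then -1 else 0

-- Source B's solve: s[:mid] = take mid, s[mid:] = drop mid (exact, since 0 ≤ mid ≤ len s);
-- left[-1] is ported as getLastD 0 — left is nonempty here (mid ≥ 1), so the default is never used.
def skewSolve (s : List Char) : List Int :=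
  if _h0 : s.length = 0 then []
  else if _h1 : s.length = 1 then [skewDelta s.headI]
  else
    let mid := s.length / 2
    let left := skewSolve (s.take mid)
    let right := skewSolve (s.drop mid)
    let t := left.getLastD 0
    left ++ right.map (fun x => t + x)
termination_by s.length
decreasing_by
  · simp only [List.length_take]; omega
  · simp only [List.length_drop]; omega

def skew_alt (Genome : String) : List (Int × Int) :=
  (PySem.Dict.ofList (PySem.List.enumerate ([0] ++ skewSolve Genome.toList) 0)).items

-- ===== PRECONDITION & SPEC =====
def Spec_skew (Genome : String) (out : List (Int × Int)) : Prop := out = skew_alt Genome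
instance (Genome : String) (out : List (Int × Int)) : Decidable (Spec_skew Genome out) := by unfold Spec_skew; infer_instance

-- ===== CLAIM (what is proved, stated in full; the proofs are below) =====
def Claim_equal_skew : Prop := ∀ (Genome : String), Dom_skew Genome → Spec_skew Genome (skew Genome)

-- ===== LEMMAS AND PROOFS =====

-- proof-side characterisation: the list of cumulative skew values starting from total t
def skewScan (t : Int) : List Char → List Int
  | [] => []
  | c :: cs => (t + skewDelta c) :: skewScan (t + skewDelta c) cs

def sumDeltas (cs : List Char) : Int := (cs.map skewDelta).sum

lemma skewBody_char (Genome : String) (S : PySem.Dict Int Int) (i : Int) (c : Char)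
    (h : PySem.Str.pyGet? Genome i = some c) :
    skewBody Genome S i = S.insert (i + 1) (S.getD i 0 + skewDelta c) := by
  unfold skewBody skewDelta
  have hi : i + 1 - 1 = i := by ring
  rw [h, hi]
  by_cases hG : c = 'G' <;> by_cases hC : c = 'C' <;>
    simp [hG, hC, sub_eq_add_neg]

lemma keys_mk_enumerate (zs : List Int) :
    (PySem.Dict.mk (PySem.List.enumerate zs 0)).keys.Nodup := by
  have : (PySem.Dict.mk (PySem.List.enumerate zs 0)).keys
      = PySem.List.pyRange 0 (0 + zs.length) 1 := by
    rw [PySem.Dict.keys_mk, PySem.List.map_fst_enumerate]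
  rw [this]
  exact PySem.List.nodup_pyRange_one 0 _

lemma getD_mk_enumerate_last (ys : List Int) (t : Int) :
    (PySem.Dict.mk (PySem.List.enumerate (ys ++ [t]) 0)).getD (ys.length : Int) 0 = t := by
  apply PySem.Dict.getD_of_mem_items
  · show ((ys.length : Int), t) ∈ PySem.List.enumerate (ys ++ [t]) 0
    rw [PySem.List.mem_enumerate_iff]
    refine ⟨ys.length, by simp, ?_⟩
    simp
  · exact keys_mk_enumerate _

lemma insert_mk_enumerate (zs : List Int) (v : Int) :
    (PySem.Dict.mk (PySem.List.enumerate zs 0)).insert (zs.length : Int) v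
      = PySem.Dict.mk (PySem.List.enumerate (zs ++ [v]) 0) := by
  apply PySem.Dict.ext
  have hnc : (PySem.Dict.mk (PySem.List.enumerate zs 0)).contains (zs.length : Int) = false := by
    rw [PySem.Dict.contains_eq_decide_mem_keys, PySem.Dict.keys_mk,
      PySem.List.map_fst_enumerate, decide_eq_false_iff_not, PySem.List.mem_pyRange_one]
    omega
  rw [PySem.Dict.items_insert_of_not_contains _ _ hnc]
  show PySem.List.enumerate zs 0 ++ [((zs.length : Int), v)]
      = PySem.List.enumerate (zs ++ [v]) 0
  rw [PySem.List.enumerate_append]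
  simp [PySem.List.enumerate]

lemma skew_loop (Genome : String) (cs : List Char) (ys : List Int) (t : Int)
    (h : ∀ (k : Nat) (hk : k < cs.length),
        PySem.Str.pyGet? Genome ((ys.length : Int) + k) = some (cs[k])) :
    (PySem.List.pyRange (ys.length : Int) ((ys.length : Int) + cs.length) 1).foldl
        (skewBody Genome) (PySem.Dict.mk (PySem.List.enumerate (ys ++ [t]) 0))
      = PySem.Dict.mk (PySem.List.enumerate ((ys ++ [t]) ++ skewScan t cs) 0) := by
  induction cs generalizing ys t with
  | nil => simp [PySem.List.pyRange_one_eq_nil, skewScan]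
  | cons c cs ih =>
    rw [PySem.List.pyRange_one_cons (by simp only [List.length_cons]; push_cast; omega)]
    simp only [List.foldl_cons]
    have hc : PySem.Str.pyGet? Genome (ys.length : Int) = some c := by
      have := h 0 (by simp)
      simpa using this
    rw [skewBody_char Genome _ _ c hc, getD_mk_enumerate_last]
    have hlen : ((ys.length : Int) + 1) = (((ys ++ [t]).length : Int)) := by simp
    rw [hlen, insert_mk_enumerate]
    have ih' := ih (ys ++ [t]) (t + skewDelta c) (fun k hk => by
      have h2 := h (k + 1) (by simp; omega)
      have hidx : (((ys ++ [t]).length : Int)) + (k : Int)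
          = (ys.length : Int) + (((k + 1 : Nat)) : Int) := by simp; ring
      rw [hidx, h2]
      simp)
    have harith : ((ys ++ [t]).length : Int) + (cs.length : Int)
        = (ys.length : Int) + ((c :: cs).length : Int) := by simp; ring
    rw [← harith] at *
    rw [ih']
    have : (ys ++ [t]) ++ [t + skewDelta c] ++ skewScan (t + skewDelta c) cs
        = (ys ++ [t]) ++ skewScan t (c :: cs) := by
      simp [skewScan, List.append_assoc]
    rw [this]

lemma skewScan_shift (cs : List Char) (t : Int) :
    skewScan t cs = (skewScan 0 cs).map (fun x => t + x) := by
  induction cs generalizing t with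
  | nil => simp [skewScan]
  | cons c cs ih =>
    simp only [skewScan, zero_add, List.map_cons]
    rw [ih (t + skewDelta c), ih (skewDelta c), List.map_map]
    refine congrArg (List.cons _) ?_
    refine List.map_congr_left (fun x _ => ?_)
    simp [Function.comp, add_assoc]

lemma skewScan_append (a b : List Char) (t : Int) :
    skewScan t (a ++ b) = skewScan t a ++ skewScan (t + sumDeltas a) b := by
  induction a generalizing t with
  | nil => simp [skewScan, sumDeltas]
  | cons c a ih =>
    simp only [List.cons_append, skewScan, ih]
    have : t + skewDelta c + sumDeltas a = t + sumDeltas (c :: a) := by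
      simp [sumDeltas]; ring
    rw [this]

lemma skewScan_getLastD (cs : List Char) (t : Int) :
    (skewScan t cs).getLastD t = t + sumDeltas cs := by
  induction cs generalizing t with
  | nil => simp [skewScan, sumDeltas]
  | cons c cs ih =>
    simp only [skewScan, List.getLastD_cons]
    rw [ih (t + skewDelta c)]
    simp [sumDeltas]; ring

lemma skewSolve_eq_scan (s : List Char) : skewSolve s = skewScan 0 s := by
  induction s using skewSolve.induct with
  | case1 s h =>
    have hs : s = [] := List.length_eq_zero_iff.mp h
    subst hs; simp [skewSolve, skewScan]
  | case2 s h0 h1 =>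
    obtain ⟨c, hc⟩ := List.length_eq_one_iff.mp h1
    subst hc; simp [skewSolve, skewScan]
  | case3 s h0 h1 mid ih1 ih2 =>
    rw [skewSolve, dif_neg h0, dif_neg h1]
    dsimp only
    rw [show (mid : Nat) = s.length / 2 from rfl] at ih1 ih2
    rw [ih1, ih2]
    have hlast := skewScan_getLastD (s.take (s.length / 2)) 0
    rw [zero_add] at hlast
    simp only [hlast]
    conv_rhs => rw [← List.take_append_drop (s.length / 2) s]
    rw [skewScan_append, skewScan_shift (s.drop (s.length / 2))]
    simp
    exact (skewScan_shift _ _).symm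

-- ===== VERDICT (by name: the statement is the Claim_ definition above) =====
theorem skew_spec : Claim_equal_skew := by
  intro Genome _
  unfold Spec_skew
  have hskew : skew Genome = ((PySem.List.pyRange 0 (PySem.Str.len Genome) 1).foldl
      (skewBody Genome) (PySem.Dict.empty.insert 0 0)).items := rfl
  rw [hskew]
  -- A side
  have hA : (PySem.List.pyRange 0 (PySem.Str.len Genome) 1).foldl (skewBody Genome)
      (PySem.Dict.empty.insert 0 0)
      = PySem.Dict.mk (PySem.List.enumerate (([] ++ [0]) ++ skewScan 0 Genome.toList) 0) := by
    have h0 : (PySem.Dict.empty.insert 0 0 : PySem.Dict Int Int)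
        = PySem.Dict.mk (PySem.List.enumerate ([] ++ [(0:Int)]) 0) := rfl
    have hlen : PySem.Str.len Genome = ((([] : List Int).length : Int) + Genome.toList.length) := by
      simp [PySem.Str.len_eq]
    rw [h0, hlen]
    have h00 : (0 : Int) = (([] : List Int).length : Int) := by simp
    rw [h00]
    exact skew_loop Genome Genome.toList [] 0 (fun k hk => by
      simp only [List.length_nil, Int.natCast_zero, zero_add]
      show PySem.Chars.pyGet? Genome.toList (k : Int) = some (Genome.toList[k])
      rw [show PySem.Chars.pyGet? Genome.toList (k : Int)
            = PySem.List.pyGet? Genome.toList (k : Int) from rfl]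
      rw [PySem.List.pyGet?_natCast]
      simp)
  rw [hA]
  -- B side
  unfold skew_alt
  rw [skewSolve_eq_scan]
  -- dict(enumerate(...)) with fresh distinct keys builds exactly that items list
  have hfresh := PySem.Dict.items_foldl_insert_fresh
      (PySem.List.enumerate ((0 : Int) :: skewScan 0 Genome.toList) 0)
      (fun p => p.1) (fun p => p.2) (PySem.Dict.empty : PySem.Dict Int Int)
      (fun a _ => by simp [PySem.Dict.contains_empty])
      (by rw [PySem.List.map_fst_enumerate]; exact PySem.List.nodup_pyRange_one 0 _)
  show (PySem.Dict.mk (PySem.List.enumerate (([] ++ [0]) ++ skewScan 0 Genome.toList) 0)).items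
      = (PySem.Dict.ofList (PySem.List.enumerate ([0] ++ skewScan 0 Genome.toList) 0)).items
  have hfresh' : (List.foldl (fun (acc : PySem.Dict Int Int) (p : Int × Int) => acc.insert p.1 p.2)
        PySem.Dict.empty (PySem.List.enumerate ([0] ++ skewScan 0 Genome.toList) 0)).items
      = PySem.List.enumerate ([0] ++ skewScan 0 Genome.toList) 0 := by
    simpa using hfresh
  unfold PySem.Dict.ofList PySem.Dict.update
  rw [hfresh']
  simp
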